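-- pv_equiv track=rewrite | github.com/tuetschek/Highlight_based_Summarization | Highlight_evaluation/get_summ_for_human_eva.py | highlight_filter
-- ===== SOURCE A (Python) =====
-- def highlight_filter(toks, stop_words):
--     b_strong = False
--     all_stop_words = True
--     for tok in toks:
--         if tok == "<strong>":
--             b_strong = True
--             continue
--         if tok == "</strong>":
--             break
--         if b_strong:
--             if tok not in stop_words:
--                 all_stop_words = False
--                 break
--     return all_stop_words
-- ===== SOURCE B (Python) =====
-- def highlight_filter(toks, stop_words):
--     # boundary decomposition: locate the first "</strong>", then test the
--     # highlighted slice after the first "<strong>" wholesale with all()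
--     end = toks.index("</strong>") if "</strong>" in toks else len(toks)
--     prefix = toks[:end]
--     if "<strong>" not in prefix:
--         return True
--     s = prefix.index("<strong>")
--     return all(t in stop_words for t in prefix[s + 1:] if t != "<strong>")
-- ===== Notes on version B (the rewrite author's own statement) =====
-- stated objective: alternative
-- what changed: Replaces the flag-carrying single pass with explicit boundary location (first '</strong>', first '<strong>' in the prefix) followed by a slice-wide all() membership test.
import Mathlib
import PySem

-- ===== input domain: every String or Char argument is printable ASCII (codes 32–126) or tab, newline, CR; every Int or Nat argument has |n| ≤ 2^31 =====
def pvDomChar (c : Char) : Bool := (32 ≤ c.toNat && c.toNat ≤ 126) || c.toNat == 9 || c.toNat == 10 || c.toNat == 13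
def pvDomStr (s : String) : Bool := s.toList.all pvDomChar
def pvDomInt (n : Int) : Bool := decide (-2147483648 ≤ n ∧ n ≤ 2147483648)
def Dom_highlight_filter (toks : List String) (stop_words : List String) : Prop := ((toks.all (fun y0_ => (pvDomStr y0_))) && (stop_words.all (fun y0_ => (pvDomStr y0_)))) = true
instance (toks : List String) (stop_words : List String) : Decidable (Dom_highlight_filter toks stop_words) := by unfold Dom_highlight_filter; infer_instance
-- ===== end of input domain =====

-- B replaces A's flag-carrying single pass by explicit boundary location plus a slice-wide all() test (alternative decomposition, same cost).

-- ===== PORT A =====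
-- the for-loop of A: state = (b_strong, all_stop_words); break returns the accumulator
def hfLoopA (stop_words : List String) : List String → Bool → Bool → Bool
  | [], _, all_stop_words => all_stop_words
  | tok :: rest, b_strong, all_stop_words =>
    if tok = "<strong>" then hfLoopA stop_words rest true all_stop_words
    else if tok = "</strong>" then all_stop_words
    else if b_strong then
      if stop_words.contains tok then hfLoopA stop_words rest b_strong all_stop_words
      else false            -- all_stop_words = False; break
    else hfLoopA stop_words rest b_strong all_stop_words

def highlight_filter (toks : List String) (stop_words : List String) : Bool :=
  hfLoopA stop_words toks false true

-- ===== PORT B =====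
def highlight_filter_alt (toks : List String) (stop_words : List String) : Bool :=
  let e : Nat := match PySem.List.index? toks "</strong>" with
    | some i => i
    | none => toks.length
  let pfx := PySem.List.slice toks none (some (e : Int))           -- toks[:end]
  if pfx.contains "<strong>" = false then true
  else match PySem.List.index? pfx "<strong>" with
    | some s =>
        ((PySem.List.slice pfx (some ((s : Int) + 1)) none).filter
            (fun t => t != "<strong>")).all (fun t => stop_words.contains t)
    | none => true                                                 -- unreachable: "<strong>" ∈ pfx

-- ===== PRECONDITION & SPEC =====
def Spec_highlight_filter (toks : List String) (stop_words : List String) (out : Bool) : Prop := out = highlight_filter_alt toks stop_words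
instance (toks : List String) (stop_words : List String) (out : Bool) : Decidable (Spec_highlight_filter toks stop_words out) := by unfold Spec_highlight_filter; infer_instance

-- ===== CLAIM (what is proved, stated in full; the proofs are below) =====
def Claim_equal_highlight_filter : Prop := ∀ (toks : List String) (stop_words : List String), Dom_highlight_filter toks stop_words → Spec_highlight_filter toks stop_words (highlight_filter toks stop_words)

-- ===== LEMMAS AND PROOFS =====

-- common reference form: prefix before the first "</strong>", suffix from the first "<strong>",
-- every non-"<strong>" token a stop word
def hfPred (stop_words : List String) (t : String) : Bool :=
  t == "<strong>" || stop_words.contains t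

def hfRef (toks : List String) (stop_words : List String) : Bool :=
  ((toks.takeWhile (fun t => t != "</strong>")).dropWhile (fun t => t != "<strong>")).all
    (hfPred stop_words)

theorem hfLoopA_strong (stop_words : List String) :
    ∀ l : List String, hfLoopA stop_words l true true
      = (l.takeWhile (fun t => t != "</strong>")).all (hfPred stop_words) := by
  intro l
  induction l with
  | nil => rfl
  | cons t rest ih =>
    by_cases h1 : t = "<strong>"
    · subst h1; simp [hfLoopA, List.takeWhile_cons, hfPred, ih]
    · by_cases h2 : t = "</strong>"
      · subst h2; simp [hfLoopA, List.takeWhile_cons]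
      · have hb1 : (t == "<strong>") = false := by simp [h1]
        have hb2 : (t != "</strong>") = true := by simp [h2]
        by_cases h3 : stop_words.contains t
        · simp [List.contains_eq_mem] at h3
          simp [hfLoopA, h1, h2, h3, hb1, hb2, hfPred, ih]
        · simp [List.contains_eq_mem] at h3
          simp [hfLoopA, h1, h2, h3, hb1, hb2, hfPred]

theorem hfLoopA_eq_ref (stop_words : List String) :
    ∀ l : List String, hfLoopA stop_words l false true = hfRef l stop_words := by
  intro l
  induction l with
  | nil => rfl
  | cons t rest ih =>
    by_cases h1 : t = "<strong>"
    · subst h1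
      simp [hfLoopA, hfRef, List.takeWhile_cons, List.dropWhile_cons, hfPred,
        hfLoopA_strong, List.all_cons]
    · by_cases h2 : t = "</strong>"
      · subst h2; simp [hfLoopA, hfRef, List.takeWhile_cons]
      · have hb1 : (t != "<strong>") = true := by simp [h1]
        have hb2 : (t != "</strong>") = true := by simp [h2]
        rw [show hfLoopA stop_words (t :: rest) false true
              = hfLoopA stop_words rest false true by simp [hfLoopA, h1, h2]]
        rw [ih]
        unfold hfRef
        simp [List.takeWhile_cons, List.dropWhile_cons, hb1, hb2]

-- the prefix computed by B is the takeWhile prefix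
theorem hfPrefix_eq (toks : List String) :
    PySem.List.slice toks none
        (some ((match PySem.List.index? toks "</strong>" with
                 | some i => i
                 | none => toks.length : Nat) : Int))
      = toks.takeWhile (fun t => t != "</strong>") := by
  cases hidx : PySem.List.index? toks "</strong>" with
  | none =>
    have hnm : "</strong>" ∉ toks := (PySem.List.index?_eq_none_iff toks "</strong>").mp hidx
    simp only [PySem.List.slice_to_natCast, List.take_length]
    symm
    rw [List.takeWhile_eq_self_iff]
    intro a ha
    simp only [bne_iff_ne, ne_eq]
    intro h; exact hnm (h ▸ ha)
  | some k =>
    obtain ⟨pre, suf, hsplit, hlen, hnm⟩ := (PySem.List.index?_eq_some_iff toks "</strong>" k).mp hidx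
    subst hsplit
    simp only [PySem.List.slice_to_natCast]
    rw [← hlen, List.take_append_of_le_length (le_refl _), List.take_length]
    rw [List.takeWhile_append]
    have hall : pre.takeWhile (fun t => t != "</strong>") = pre := by
      rw [List.takeWhile_eq_self_iff]
      intro a ha
      simp only [bne_iff_ne, ne_eq]
      intro h; exact hnm (h ▸ ha)
    simp [hall, List.takeWhile_cons]

-- dropWhile over a prefix not containing the sought element
theorem dropWhile_not_mem {v : String} :
    ∀ (pre suf : List String), v ∉ pre →
      (pre ++ v :: suf).dropWhile (fun t => t != v) = v :: suf := by
  intro pre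
  induction pre with
  | nil => intro suf _; simp [List.dropWhile_cons]
  | cons a as ih =>
    intro suf h
    have ha : a ≠ v := fun hv => h (hv ▸ List.mem_cons_self)
    simp only [List.cons_append, List.dropWhile_cons]
    simp [ha, ih suf (fun hv => h (List.mem_cons_of_mem a hv))]

theorem hfAlt_eq_ref (toks : List String) (stop_words : List String) :
    highlight_filter_alt toks stop_words = hfRef toks stop_words := by
  show (let e : Nat := match PySem.List.index? toks "</strong>" with
          | some i => i
          | none => toks.length
        let pfx := PySem.List.slice toks none (some (e : Int))
        if pfx.contains "<strong>" = false then true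
        else match PySem.List.index? pfx "<strong>" with
          | some s =>
              ((PySem.List.slice pfx (some ((s : Int) + 1)) none).filter
                  (fun t => t != "<strong>")).all (fun t => stop_words.contains t)
          | none => true) = hfRef toks stop_words
  simp only []
  rw [hfPrefix_eq]
  set pfx := toks.takeWhile (fun t => t != "</strong>") with hpfx
  by_cases hmem : "<strong>" ∈ pfx
  · rw [if_neg (by simp [hmem])]
    cases hidx : PySem.List.index? pfx "<strong>" with
    | none => exact (((PySem.List.index?_eq_none_iff pfx "<strong>").mp hidx) hmem).elim
    | some s =>
      obtain ⟨pre, suf, hsplit, hlen, hnm⟩ := (PySem.List.index?_eq_some_iff pfx "<strong>" s).mp hidx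
      have hslice : PySem.List.slice pfx (some ((s : Int) + 1)) none = suf := by
        have hc : ((s : Int) + 1) = ((s + 1 : Nat) : Int) := by push_cast; ring
        rw [hc, PySem.List.slice_from_natCast, hsplit, ← hlen]
        rw [show pre.length + 1 = (pre ++ ["<strong>"]).length by simp]
        rw [show pre ++ "<strong>" :: suf = (pre ++ ["<strong>"]) ++ suf by simp]
        simp
      change ((PySem.List.slice pfx (some ((s : Int) + 1)) none).filter
          (fun t => t != "<strong>")).all (fun t => stop_words.contains t) = hfRef toks stop_words
      rw [hslice]
      unfold hfRef
      rw [← hpfx, hsplit, dropWhile_not_mem pre suf hnm]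
      simp only [List.all_filter, List.all_cons, hfPred]
      rw [show ((("<strong>" : String) == "<strong>") || stop_words.contains "<strong>") = true by simp]
      rw [Bool.true_and]
      congr 1
      funext a
      cases h : a == "<strong>" <;> simp [bne, h, hfPred, List.contains_eq_mem]
  · rw [if_pos (by simp [hmem])]
    unfold hfRef
    rw [← hpfx]
    have hnil : pfx.dropWhile (fun t => t != "<strong>") = [] := by
      rw [List.dropWhile_eq_nil_iff]
      intro a ha
      simp only [bne_iff_ne, ne_eq]
      intro h; exact hmem (h ▸ ha)
    simp [hnil]

-- ===== VERDICT (by name: the statement is the Claim_ definition above) =====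
theorem highlight_filter_spec : Claim_equal_highlight_filter := by
  intro toks stop_words _
  unfold Spec_highlight_filter highlight_filter
  rw [hfLoopA_eq_ref, hfAlt_eq_ref]
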